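-- pv_equiv track=rewrite | github.com/sethc5/modframe | scripts/validate_metadata.py | list_item_spans
-- ===== SOURCE A (Python) =====
-- def list_item_spans(block_lines: list[str]) -> list[list[str]]:
--     spans: list[list[str]] = []
--     current: list[str] = []
--     for line in block_lines:
--         if line.lstrip().startswith("-"):
--             if current:
--                 spans.append(current)
--             current = [line]
--         elif current:
--             current.append(line)
--     if current:
--         spans.append(current)
--     return spans
-- ===== SOURCE B (Python) =====
-- def list_item_spans(block_lines: list[str]) -> list[list[str]]:
--     starts = [i for i, line in enumerate(block_lines) if line.lstrip().startswith("-")]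
--     ends = starts[1:] + [len(block_lines)]
--     return [block_lines[s:e] for s, e in zip(starts, ends)]
-- ===== Notes on version B (the rewrite author's own statement) =====
-- stated objective: alternative
-- what changed: Replaces the streaming accumulator loop (current span flushed on each '-' marker) by an index-table decomposition: first collect the indices of marker lines, then emit each span as a slice between consecutive marker indices (the last ending at len(block_lines)).
import Mathlib
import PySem

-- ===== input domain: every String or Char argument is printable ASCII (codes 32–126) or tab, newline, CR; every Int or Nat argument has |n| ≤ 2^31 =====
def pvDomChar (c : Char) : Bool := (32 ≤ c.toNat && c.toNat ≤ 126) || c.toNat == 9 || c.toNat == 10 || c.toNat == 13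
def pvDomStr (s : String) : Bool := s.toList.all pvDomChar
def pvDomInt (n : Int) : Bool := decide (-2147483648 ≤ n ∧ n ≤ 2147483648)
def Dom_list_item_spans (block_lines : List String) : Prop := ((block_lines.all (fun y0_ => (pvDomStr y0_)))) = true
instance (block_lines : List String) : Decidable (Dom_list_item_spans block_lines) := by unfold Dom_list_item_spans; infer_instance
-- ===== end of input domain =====

-- B replaces A's streaming accumulator loop by a marker-index table followed by a
-- slice-producing pass (alternative decomposition; same O(n) cost).


-- line.lstrip().startswith("-")  (shared marker test of both Pythons)
def isMarker (line : String) : Bool := PySem.Str.startswith (PySem.Str.lstrip line) "-"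

-- ===== PORT A =====
-- one step of A's for-loop over (spans, current)
def lisStep (st : List (List String) × List String) (line : String) :
    List (List String) × List String :=
  if isMarker line then
    ((if st.2.isEmpty then st.1 else st.1 ++ [st.2]), [line])
  else if st.2.isEmpty then st
  else (st.1, st.2 ++ [line])

def list_item_spans (block_lines : List String) : List (List String) :=
  let r := block_lines.foldl lisStep ([], [])
  if r.2.isEmpty then r.1 else r.1 ++ [r.2]

-- ===== PORT B =====
def list_item_spans_alt (block_lines : List String) : List (List String) :=
  let starts : List Int :=
    ((PySem.List.enumerate block_lines).filter (fun p => isMarker p.2)).map (·.1)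
  let ends : List Int := starts.drop 1 ++ [(block_lines.length : Int)]   -- starts[1:] + [len(block_lines)]
  (starts.zip ends).map (fun se => PySem.List.slice block_lines (some se.1) (some se.2))

-- ===== PRECONDITION & SPEC =====
def Spec_list_item_spans (block_lines : List String) (out : List (List String)) : Prop := out = list_item_spans_alt block_lines
instance (block_lines : List String) (out : List (List String)) : Decidable (Spec_list_item_spans block_lines out) := by unfold Spec_list_item_spans; infer_instance

-- ===== CLAIM (what is proved, stated in full; the proofs are below) =====
def Claim_equal_list_item_spans : Prop := ∀ (block_lines : List String), Dom_list_item_spans block_lines → Spec_list_item_spans block_lines (list_item_spans block_lines)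

-- ===== LEMMAS AND PROOFS =====

-- canonical recursive characterisation both ports are proved equal to
def spec : List String → List (List String)
  | [] => []
  | l :: ls =>
    if isMarker l then
      (l :: ls.takeWhile (fun x => !isMarker x)) :: spec (ls.dropWhile (fun x => !isMarker x))
    else spec ls
termination_by ls => ls.length
decreasing_by
  · simpa using Nat.lt_succ_of_le (List.length_dropWhile_le _ _)
  · simp

theorem spec_nil : spec [] = [] := by rw [spec]

theorem spec_cons (l : String) (ls : List String) :
    spec (l :: ls) = if isMarker l then
      (l :: ls.takeWhile (fun x => !isMarker x)) :: spec (ls.dropWhile (fun x => !isMarker x))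
    else spec ls := by rw [spec]

-- nat-index marker table
def markerAux (i : Nat) : List String → List Nat
  | [] => []
  | l :: ls => if isMarker l then i :: markerAux (i+1) ls else markerAux (i+1) ls

-- nat-level reformulation of B
def spansN (lines : List String) : List (List String) :=
  ((markerAux 0 lines).zip ((markerAux 0 lines).drop 1 ++ [lines.length])).map
    (fun se => (lines.drop se.1).take (se.2 - se.1))

theorem markerAux_succ (ls : List String) : ∀ i, markerAux (i+1) ls = (markerAux i ls).map (· + 1) := by
  induction ls with
  | nil => intro i; simp [markerAux]
  | cons l ls ih =>
    intro i
    simp only [markerAux]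
    by_cases h : isMarker l <;> simp [h, ih (i+1), ih i]

theorem takeWhile_eq_take (ls : List String) :
    ls.takeWhile (fun x => !isMarker x) = ls.take ((markerAux 0 ls).head?.getD ls.length) := by
  induction ls with
  | nil => simp
  | cons l ls ih =>
    simp only [markerAux, List.takeWhile_cons]
    by_cases h : isMarker l
    · simp [h]
    · simp only [h, Bool.not_false, if_true, markerAux_succ ls 0]
      rcases hm : markerAux 0 ls with _ | ⟨k, m⟩
      · rw [hm] at ih; simp at ih ⊢; exact ih
      · rw [hm] at ih; simp at ih ⊢; exact ih

theorem dropWhile_eq_drop (ls : List String) :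
    ls.dropWhile (fun x => !isMarker x) = ls.drop ((markerAux 0 ls).head?.getD ls.length) := by
  induction ls with
  | nil => simp
  | cons l ls ih =>
    simp only [markerAux, List.dropWhile_cons]
    by_cases h : isMarker l
    · simp [h]
    · simp only [h, Bool.not_false, if_true, markerAux_succ ls 0]
      rcases hm : markerAux 0 ls with _ | ⟨k, m⟩
      · rw [hm] at ih; simp at ih ⊢; exact ih
      · rw [hm] at ih; simp at ih ⊢; exact ih

theorem spec_dropWhile (ls : List String) :
    spec (ls.dropWhile (fun x => !isMarker x)) = spec ls := by
  induction ls with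
  | nil => simp [spec_nil]
  | cons l ls ih =>
    by_cases h : isMarker l
    · simp [h]
    · simp only [List.dropWhile_cons, h, Bool.not_false, if_true, ih]
      rw [spec_cons]; simp [h]

-- the shifted tail of B's zip over (l :: ls) equals B's zip over ls
theorem shift_zip (l : String) (ls : List String) (m : List Nat) :
    (((m.map (· + 1)).zip ((m.map (· + 1)).drop 1 ++ [ls.length + 1])).map
        (fun se => ((l :: ls).drop se.1).take (se.2 - se.1)))
      = ((m.zip (m.drop 1 ++ [ls.length])).map
        (fun se => (ls.drop se.1).take (se.2 - se.1))) := by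
  have h1 : (m.map (· + 1)).drop 1 ++ [ls.length + 1] = (m.drop 1 ++ [ls.length]).map (· + 1) := by
    simp
  rw [h1, List.zip_map, List.map_map]
  apply List.map_congr_left
  intro se _
  simp [Prod.map]

theorem spansN_eq_spec (lines : List String) : spansN lines = spec lines := by
  induction lines with
  | nil => simp [spansN, markerAux, spec_nil]
  | cons l ls ih =>
    rw [spec_cons]
    by_cases h : isMarker l
    · simp only [h, if_true]
      unfold spansN
      simp only [markerAux, h, if_true, markerAux_succ ls 0, List.length_cons]
      rcases hm : markerAux 0 ls with _ | ⟨k, m2⟩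
      · have ht : ls.takeWhile (fun x => !isMarker x) = ls := by
          rw [takeWhile_eq_take, hm]; simp
        have hd : ls.dropWhile (fun x => !isMarker x) = [] := by
          rw [dropWhile_eq_drop, hm]; simp
        simp [ht, hd, spec_nil, List.take_of_length_le]
      · have ht : ls.takeWhile (fun x => !isMarker x) = ls.take k := by
          rw [takeWhile_eq_take, hm]; simp
        have key := shift_zip l ls (k :: m2)
        have hspan : spansN ls = spec ls := ih
        unfold spansN at hspan
        rw [hm] at hspan
        simp only [List.map_cons, List.drop_succ_cons, List.drop_zero] at key hspan ⊢
        simp only [List.cons_append]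
        rw [List.zip_cons_cons, List.map_cons, key, hspan, spec_dropWhile ls]
        simp [ht]
    · simp only [h]
      rw [← ih]
      unfold spansN
      simp only [markerAux, h, markerAux_succ ls 0, List.length_cons]
      simpa using shift_zip l ls (markerAux 0 ls)

-- bridge: B's Int-indexed enumerate/filter equals the nat marker table
theorem enum_marker (ls : List String) : ∀ i : Nat,
    (((PySem.List.enumerate ls (i : Int)).filter (fun p => isMarker p.2)).map (·.1))
      = (markerAux i ls).map Int.ofNat := by
  induction ls with
  | nil => intro i; simp [PySem.List.enumerate_nil, markerAux]
  | cons l ls ih =>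
    intro i
    rw [PySem.List.enumerate_cons, show (i : Int) + 1 = ((i + 1 : Nat) : Int) by push_cast; ring]
    by_cases h : isMarker l
    · simp only [markerAux, List.filter_cons, h, if_true, List.map_cons]
      rw [ih (i + 1)]
      simp
    · simp only [markerAux, List.filter_cons, h, Bool.false_eq_true, if_false]
      exact ih (i + 1)

theorem map_cast_drop (m : List Nat) :
    (m.map Int.ofNat).drop 1 = (m.drop 1).map Int.ofNat := by
  cases m <;> rfl

theorem alt_eq_spansN (lines : List String) : list_item_spans_alt lines = spansN lines := by
  show ((((PySem.List.enumerate lines ((0 : Nat) : Int)).filter (fun p => isMarker p.2)).map (·.1)).zip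
      ((((PySem.List.enumerate lines ((0 : Nat) : Int)).filter (fun p => isMarker p.2)).map (·.1)).drop 1
        ++ [(lines.length : Int)])).map
      (fun se => PySem.List.slice lines (some se.1) (some se.2)) = spansN lines
  rw [enum_marker lines 0]
  have h1 : ((markerAux 0 lines).map Int.ofNat).drop 1 ++ [(lines.length : Int)]
      = ((markerAux 0 lines).drop 1 ++ [lines.length]).map Int.ofNat := by
    rw [List.map_append, map_cast_drop]; rfl
  rw [h1, List.zip_map, List.map_map]
  unfold spansN
  apply List.map_congr_left
  intro se _
  show PySem.List.slice lines (some ((se.1 : Nat) : Int)) (some ((se.2 : Nat) : Int))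
      = (lines.drop se.1).take (se.2 - se.1)
  rw [PySem.List.slice_natCast]

-- ===== A-side: the accumulator loop equals spec =====

theorem foldl_loop_ne (ls : List String) : ∀ spans cur, cur ≠ [] →
    (let r := ls.foldl lisStep (spans, cur); if r.2.isEmpty then r.1 else r.1 ++ [r.2])
      = spans ++ (cur ++ ls.takeWhile (fun x => !isMarker x)) :: spec (ls.dropWhile (fun x => !isMarker x)) := by
  induction ls with
  | nil => intro spans cur hc; simp [List.foldl_nil, List.isEmpty_iff, hc, spec_nil]
  | cons l ls ih =>
    intro spans cur hc
    simp only [List.foldl_cons]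
    by_cases h : isMarker l
    · have hstep : lisStep (spans, cur) l = (spans ++ [cur], [l]) := by
        simp [lisStep, h, List.isEmpty_iff, hc]
      rw [hstep, ih (spans ++ [cur]) [l] (by simp)]
      rw [List.takeWhile_cons, List.dropWhile_cons]
      simp only [h, Bool.not_true, Bool.false_eq_true, if_false, spec_cons, if_true]
      simp
    · have hstep : lisStep (spans, cur) l = (spans, cur ++ [l]) := by
        simp [lisStep, h, List.isEmpty_iff, hc]
      rw [hstep, ih spans (cur ++ [l]) (by simp)]
      simp [h]

theorem foldl_loop_nil (ls : List String) : ∀ spans,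
    (let r := ls.foldl lisStep (spans, []); if r.2.isEmpty then r.1 else r.1 ++ [r.2])
      = spans ++ spec ls := by
  induction ls with
  | nil => intro spans; simp [spec_nil]
  | cons l ls ih =>
    intro spans
    simp only [List.foldl_cons]
    by_cases h : isMarker l
    · have hstep : lisStep (spans, []) l = (spans, [l]) := by simp [lisStep, h]
      rw [hstep, foldl_loop_ne ls spans [l] (by simp)]
      rw [spec_cons]; simp [h]
    · have hstep : lisStep (spans, []) l = (spans, []) := by simp [lisStep, h]
      rw [hstep, ih spans, spec_cons]; simp [h]

theorem a_eq_spec (lines : List String) : list_item_spans lines = spec lines := by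
  unfold list_item_spans
  simpa using foldl_loop_nil lines []

-- ===== VERDICT (by name: the statement is the Claim_ definition above) =====
theorem list_item_spans_spec : Claim_equal_list_item_spans := by
  intro lines _
  unfold Spec_list_item_spans
  rw [a_eq_spec, alt_eq_spansN, spansN_eq_spec]
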